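-- pv_equiv track=rewrite | github.com/ITSTIME1/algorithms | python-algo/python_grammar/좋은 단어(fail).py | word_check
-- ===== SOURCE A (Python) =====
-- def word_check(word):
-- 	dic = {}
-- 	for i in word:
-- 		if i not in dic:
-- 			dic[i] = 1
-- 		else:
-- 			dic[i] += 1
--
-- 	isCheck = True
-- 	for i in dic.items():
-- 		if i[1] % 2 != 0:
-- 			isCheck = False
-- 			break
-- 	return isCheck
-- ===== SOURCE B (Python) =====
-- def word_check(word):
--     odd = set()
--     for c in word:
--         if c in odd:
--             odd.remove(c)
--         else:
--             odd.add(c)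
--     return not odd
-- ===== Notes on version B (the rewrite author's own statement) =====
-- stated objective: idiomatic
-- what changed: Replaces the frequency dict plus a second scan over its items with a single pass maintaining a set of characters seen an odd number of times; the answer is whether that set ends up empty.
import Mathlib
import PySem

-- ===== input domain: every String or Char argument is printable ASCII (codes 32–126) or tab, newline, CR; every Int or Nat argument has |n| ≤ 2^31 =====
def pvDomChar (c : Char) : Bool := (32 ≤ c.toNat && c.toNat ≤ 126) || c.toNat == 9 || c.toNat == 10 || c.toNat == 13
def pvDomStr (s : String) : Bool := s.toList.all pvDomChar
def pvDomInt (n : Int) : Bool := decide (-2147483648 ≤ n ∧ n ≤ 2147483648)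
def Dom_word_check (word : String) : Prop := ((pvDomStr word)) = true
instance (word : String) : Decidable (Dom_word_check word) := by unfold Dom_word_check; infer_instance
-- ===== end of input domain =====

-- B replaces A's frequency dict and second items-scan with one parity-toggle pass over a set (idiomatic, same cost).

-- ===== PORT A =====
-- the 'for i in dic.items(): if i[1] % 2 != 0: isCheck = False; break' loop
def wcCheckItems : List (Char × Int) → Bool
  | [] => true
  | p :: rest => if PySem.Int.mod p.2 2 != 0 then false else wcCheckItems rest

def word_check (word : String) : Bool :=
  let dic := word.toList.foldl
    (fun d c => if !d.contains c then d.insert c 1 else d.insert c (d.getD c 0 + 1))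
    PySem.Dict.empty
  wcCheckItems dic.items

-- ===== PORT B =====
def word_check_alt (word : String) : Bool :=
  let odd := word.toList.foldl
    (fun s c => if PySem.Set.contains s c then PySem.Set.discard s c else PySem.Set.add s c)
    PySem.Set.empty
  odd.isEmpty

-- ===== PRECONDITION & SPEC =====
def Spec_word_check (word : String) (out : Bool) : Prop := out = word_check_alt word
instance (word : String) (out : Bool) : Decidable (Spec_word_check word out) := by unfold Spec_word_check; infer_instance

-- ===== CLAIM (what is proved, stated in full; the proofs are below) =====
def Claim_equal_word_check : Prop := ∀ (word : String), Dom_word_check word → Spec_word_check word (word_check word)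

-- ===== LEMMAS AND PROOFS =====

-- A's counting loop builds exactly Counter(word)
lemma wc_dic_eq (l : List Char) :
    l.foldl (fun d c => if !d.contains c then d.insert c 1 else d.insert c (d.getD c 0 + 1))
      PySem.Dict.empty = PySem.Dict.counter l := by
  have hstep : (fun (d : PySem.Dict Char Int) c =>
      if !d.contains c then d.insert c 1 else d.insert c (d.getD c 0 + 1))
      = (fun d c => d.insert c (d.getD c 0 + 1)) := by
    funext d c
    by_cases h : d.contains c = true
    · simp [h]
    · have hn : d.get? c = none := by
        rw [PySem.Dict.get?_eq_none_iff_contains]; simp [h]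
      have h0 : d.getD c 0 = 0 := by
        rw [PySem.Dict.getD_eq_get?_getD, hn]; rfl
      simp [h, h0]
  rw [hstep, PySem.Dict.foldl_insert_getD_add_one_eq_counter]

-- the break loop is List.all evenness
lemma wc_checkItems_eq_all (l : List (Char × Int)) :
    wcCheckItems l = l.all (fun p => PySem.Int.mod p.2 2 == 0) := by
  induction l with
  | nil => rfl
  | cons p rest ih =>
    simp only [wcCheckItems, ih]
    rw [show PySem.Int.mod p.2 2 = p.2 % 2 from PySem.Int.mod_eq_emod_of_pos (by norm_num)]
    rcases Int.emod_two_eq p.2 with h | h <;> simp [h]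

lemma wc_a_iff (l : List Char) :
    (wcCheckItems ((PySem.Dict.counter l).items) = true) ↔ ∀ c, l.count c % 2 = 0 := by
  rw [wc_checkItems_eq_all, PySem.Dict.items_counter]
  simp only [List.all_map, List.all_eq_true, Function.comp]
  constructor
  · intro h c
    by_cases hc : c ∈ l
    · have := h c (by simpa [PySem.Set.mem_ofList] using hc)
      have hmod : PySem.Int.mod ((l.count c : Nat) : Int) 2 = (((l.count c) % 2 : Nat) : Int) :=
        PySem.Int.mod_natCast _ _
      simp only [beq_iff_eq] at this
      rw [hmod] at this
      exact_mod_cast this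
    · simp [List.count_eq_zero_of_not_mem hc]
  · intro h k _
    simp only [beq_iff_eq]
    have hmod : PySem.Int.mod ((l.count k : Nat) : Int) 2 = (((l.count k) % 2 : Nat) : Int) :=
      PySem.Int.mod_natCast _ _
    rw [hmod]
    exact_mod_cast h k

-- B's parity-toggle invariant
lemma wc_mem_fold (l : List Char) (s : PySem.Set Char) (hs : s.Nodup) (c : Char) :
    (c ∈ l.foldl
      (fun s c => if PySem.Set.contains s c then PySem.Set.discard s c else PySem.Set.add s c) s)
      ↔ (c ∈ s ↔ l.count c % 2 = 0) := by
  induction l generalizing s with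
  | nil => simp
  | cons x rest ih =>
    have hstep : ∀ y, (y ∈ (if PySem.Set.contains s x then PySem.Set.discard s x
        else PySem.Set.add s x)) ↔ (if y = x then x ∉ s else y ∈ s) := by
      intro y
      by_cases hm : x ∈ s
      · simp only [show PySem.Set.contains s x = true by simpa [PySem.Set.contains_iff] using hm,
          if_true, PySem.Set.mem_discard]
        by_cases hy : y = x <;> simp [hy, hm]
      · simp only [show PySem.Set.contains s x = false by
            simpa [PySem.Set.contains_iff] using hm, Bool.false_eq_true, if_false,
          PySem.Set.mem_add]
        by_cases hy : y = x <;> simp [hy, hm]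
    have hnd : (if PySem.Set.contains s x then PySem.Set.discard s x
        else PySem.Set.add s x).Nodup := by
      split
      · exact PySem.Set.nodup_discard _ _ hs
      · exact PySem.Set.nodup_add _ _ hs
    rw [List.foldl_cons, ih _ hnd, hstep c]
    by_cases hy : c = x
    · subst hy
      simp only [List.count_cons_self]
      simp only [if_true]
      by_cases hp : rest.count c % 2 = 0
      · have h1 : (rest.count c + 1) % 2 = 1 := by omega
        simp [hp, h1]
      · have h1 : (rest.count c + 1) % 2 = 0 := by omega
        simp [hp, h1]
    · rw [if_neg hy]
      have hxc : ¬ x = c := fun hh => hy hh.symm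
      simp [hxc]

lemma wc_b_iff (l : List Char) :
    ((l.foldl
      (fun s c => if PySem.Set.contains s c then PySem.Set.discard s c else PySem.Set.add s c)
      PySem.Set.empty).isEmpty = true) ↔ ∀ c, l.count c % 2 = 0 := by
  rw [List.isEmpty_iff, List.eq_nil_iff_forall_not_mem]
  constructor
  · intro h c
    have := wc_mem_fold l PySem.Set.empty (by simp [PySem.Set.empty]) c
    by_contra he
    exact h c (this.mpr (by simp [PySem.Set.empty]; omega))
  · intro h c hc
    have := (wc_mem_fold l PySem.Set.empty (by simp [PySem.Set.empty]) c).mp hc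
    exact absurd (h c) (by simpa [PySem.Set.empty] using this)

-- ===== VERDICT (by name: the statement is the Claim_ definition above) =====
theorem word_check_spec : Claim_equal_word_check := by
  intro word _
  unfold Spec_word_check word_check word_check_alt
  rw [wc_dic_eq]
  rw [Bool.eq_iff_iff, wc_a_iff, wc_b_iff]
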